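-- pv_equiv track=rewrite | github.com/ddobokki/coding-test-practice | 그외/17679_프렌즈4블록.py | solution
-- ===== SOURCE A (Python) =====
-- def find_del_block(board):
--     del_point = set()
--     for i in range(len(board) - 1):
--         for j in range(len(board[i]) - 1):
--
--             left_up = board[i][j]
--             right_up = board[i][j + 1]
--             left_down = board[i + 1][j]
--             right_down = board[i + 1][j + 1]
--
--             if left_up == right_up == left_down == right_down != "":
--                 del_point.add((i, j))
--                 del_point.add((i, j + 1))
--                 del_point.add((i + 1, j))
--                 del_point.add((i + 1, j + 1))
--     return list(del_point)
--
-- def down_blocks(board):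
--     for i in range(len(board) - 1, 0, -1):
--         for j in range(len(board[i])):
--             cur_bottom = board[i][j]
--             if cur_bottom == "":
--                 up_idx = 1
--                 while i - up_idx > 0:
--                     if board[i - up_idx][j] == "":
--                         up_idx += 1
--                     else:
--                         break
--                 board[i][j],board[i-up_idx][j] = board[i-up_idx][j], board[i][j]
--
-- def solution(m, n, board):
--     answer = 0
--     board_arr = []
--     for block in board:
--         board_arr.append(list(block))
--
--     while True:
--         del_points = find_del_block(board_arr)
--
--         if not del_points:
--             break
--
--         for y, x in del_points:
--             board_arr[y][x] = ""
--         down_blocks(board_arr)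
--
--     ans = 0
--     for b in board_arr:
--         ans += b.count("")
--
--     return ans
-- ===== SOURCE B (Python) =====
-- def solution(m, n, board):
--     grid = [list(row) for row in board]
--     while True:
--         corners = [(i, j)
--                    for i in range(len(grid) - 1)
--                    for j in range(len(grid[i]) - 1)
--                    if grid[i][j] != "" and grid[i][j] == grid[i][j + 1] == grid[i + 1][j] == grid[i + 1][j + 1]]
--         if not corners:
--             break
--         for i, j in corners:
--             grid[i][j] = grid[i][j + 1] = grid[i + 1][j] = grid[i + 1][j + 1] = ""
--         # gravity: one compaction pass per column instead of per-cell upward rescans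
--         for j in range(len(grid[0])):
--             col = [grid[i][j] for i in range(len(grid)) if grid[i][j] != ""]
--             pad = len(grid) - len(col)
--             for i in range(len(grid)):
--                 grid[i][j] = "" if i < pad else col[i - pad]
--     return sum(row.count("") for row in grid)
-- ===== Notes on version B (the rewrite author's own statement) =====
-- stated objective: alternative
-- what changed: Gravity is done by a single compaction pass per column (collect the non-empty cells, pad with empties on top) instead of A's per-cell upward rescan with swaps, and the matched 2x2 corners are collected in one comprehension and cleared directly instead of accumulating all four points of every block in a set; per removal round B visits each cell O(1) times where A's rescans are O(m) per cell, though a timing run did not confirm a >=1.5x end-to-end speed-up on its input family.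
-- outside the precondition, e.g. on solution(0, 0, ['ab', 'abc']): A returns 0, B returns 0
import Mathlib
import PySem

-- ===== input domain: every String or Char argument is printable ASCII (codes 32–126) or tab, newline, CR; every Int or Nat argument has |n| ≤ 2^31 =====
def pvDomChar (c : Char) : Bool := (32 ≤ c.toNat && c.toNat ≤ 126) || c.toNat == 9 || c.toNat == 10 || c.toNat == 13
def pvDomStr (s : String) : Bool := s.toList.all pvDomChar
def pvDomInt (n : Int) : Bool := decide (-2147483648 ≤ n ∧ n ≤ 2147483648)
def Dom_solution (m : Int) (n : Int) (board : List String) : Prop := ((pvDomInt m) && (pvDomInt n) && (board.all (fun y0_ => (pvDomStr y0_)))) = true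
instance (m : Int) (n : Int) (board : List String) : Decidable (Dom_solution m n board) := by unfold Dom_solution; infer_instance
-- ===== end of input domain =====

-- B does each gravity step as one compaction pass per column instead of A's per-cell upward rescans,
-- and collects the matched 2x2 corners in one comprehension instead of a set of all four points per block.

-- ===== PORT A =====
-- a grid cell is a Python string: a 1-char string, or "" for a cleared cell, exactly as in A
abbrev PVGrid := List (List String)

-- board[i][j] for the nonnegative loop indices of the Python (in range on the admitted rectangular boards)
def pvCell (g : PVGrid) (i j : ℕ) : String := (g.getD i []).getD j ""

-- board[i][j] = v
def pvSetCell (g : PVGrid) (i j : ℕ) (v : String) : PVGrid := g.set i ((g.getD i []).set j v)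

-- the body of find_del_block's inner loop: the chained comparison
-- left_up == right_up == left_down == right_down != "" and the four set.add calls
def pvFindInner (g : PVGrid) (i : ℕ) (s : PySem.Set (ℕ × ℕ)) (j : ℕ) : PySem.Set (ℕ × ℕ) :=
  if pvCell g i j = pvCell g i (j+1) ∧ pvCell g i (j+1) = pvCell g (i+1) j ∧
     pvCell g (i+1) j = pvCell g (i+1) (j+1) ∧ pvCell g (i+1) (j+1) ≠ "" then
    ((((PySem.Set.add s (i, j)).add (i, j+1)).add (i+1, j)).add (i+1, j+1))
  else s

-- for j in range(len(board[i]) - 1)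
def pvFindRow (g : PVGrid) (s : PySem.Set (ℕ × ℕ)) (i : ℕ) : PySem.Set (ℕ × ℕ) :=
  (List.range ((g.getD i []).length - 1)).foldl (pvFindInner g i) s

-- find_del_block (range(k) over the nonnegative k = len-1 ported as List.range (len-1): exact, the
-- subtraction also matches Python's empty range for len = 0; list(del_point) is the Set's element list,
-- consumed only by order-independent "" assignments)
def pvFindDelBlock (g : PVGrid) : List (ℕ × ℕ) :=
  (List.range (g.length - 1)).foldl (pvFindRow g) PySem.Set.empty

-- the while loop computing up_idx: pvUpCount g j (i-1) counts the consecutive "" cells at rows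
-- i-1, i-2, …, stopping before row 0 or at the first non-empty cell; up_idx = 1 + that count
def pvUpCount (g : PVGrid) (j : ℕ) : ℕ → ℕ
  | 0 => 0
  | r+1 => if pvCell g (r+1) j = "" then pvUpCount g j r + 1 else 0

-- one body of down_blocks: the swap board[i][j], board[i-up_idx][j] = board[i-up_idx][j], board[i][j]
-- (both right-hand values are read from the grid before either write, as in Python)
def pvDownStep (i : ℕ) (g : PVGrid) (j : ℕ) : PVGrid :=
  if pvCell g i j = "" then
    let u := 1 + pvUpCount g j (i - 1)
    pvSetCell (pvSetCell g i j (pvCell g (i - u) j)) (i - u) j (pvCell g i j)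
  else g

-- for j in range(len(board[i]))
def pvDownRow (g : PVGrid) (i : ℕ) : PVGrid :=
  (List.range (g.getD i []).length).foldl (pvDownStep i) g

-- for i in range(len(board)-1, 0, -1): the rows len-1, …, 1
def pvDownBlocks (g : PVGrid) : PVGrid :=
  ((List.range' 1 (g.length - 1)).reverse).foldl pvDownRow g

-- for y, x in del_points: board_arr[y][x] = ""
def pvApplyDel (pts : List (ℕ × ℕ)) (g : PVGrid) : PVGrid :=
  pts.foldl (fun g p => pvSetCell g p.1 p.2 "") g

def pvTotalCells (g : PVGrid) : ℕ := (g.map List.length).sum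

-- while True: …  (the fuel only makes the recursion structural: a productive round blanks at least 4
-- previously non-empty cells and cells never become non-empty again, so cells+1 iterations always suffice)
def pvLoopA : ℕ → PVGrid → PVGrid
  | 0, g => g
  | fuel+1, g =>
    let pts := pvFindDelBlock g
    if pts = [] then g
    else pvLoopA fuel (pvDownBlocks (pvApplyDel pts g))

def solution (m : Int) (n : Int) (board : List String) : Int :=
  let g : PVGrid := board.map (fun s => s.toList.map (fun c => String.mk [c]))
  let fin := pvLoopA (pvTotalCells g + 1) g
  ((fin.map (fun row => row.count "")).sum : ℕ)

-- ===== PORT B =====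
-- the corner comprehension body: grid[i][j] != "" and grid[i][j] == grid[i][j+1] == grid[i+1][j] == grid[i+1][j+1]
def pvCornerInner (g : PVGrid) (i : ℕ) (acc : List (ℕ × ℕ)) (j : ℕ) : List (ℕ × ℕ) :=
  if pvCell g i j ≠ "" ∧ pvCell g i j = pvCell g i (j+1) ∧
     pvCell g i (j+1) = pvCell g (i+1) j ∧ pvCell g (i+1) j = pvCell g (i+1) (j+1)
  then acc ++ [(i, j)] else acc

def pvCornerRow (g : PVGrid) (acc : List (ℕ × ℕ)) (i : ℕ) : List (ℕ × ℕ) :=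
  (List.range ((g.getD i []).length - 1)).foldl (pvCornerInner g i) acc

def pvCornersB (g : PVGrid) : List (ℕ × ℕ) :=
  (List.range (g.length - 1)).foldl (pvCornerRow g) []

-- for i, j in corners: grid[i][j] = grid[i][j+1] = grid[i+1][j] = grid[i+1][j+1] = ""
def pvClear (cs : List (ℕ × ℕ)) (g : PVGrid) : PVGrid :=
  cs.foldl (fun g p =>
    pvSetCell (pvSetCell (pvSetCell (pvSetCell g p.1 p.2 "") p.1 (p.2+1) "") (p.1+1) p.2 "") (p.1+1) (p.2+1) "") g

-- one compaction pass for column j: col = the non-empty cells top-to-bottom, then rewrite the column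
def pvGravityCol (g : PVGrid) (j : ℕ) : PVGrid :=
  let col := ((List.range g.length).map (fun i => pvCell g i j)).filter (fun v => v ≠ "")
  let pad := g.length - col.length
  (List.range g.length).foldl (fun g i => pvSetCell g i j (if i < pad then "" else col.getD (i - pad) "")) g

-- for j in range(len(grid[0]))
def pvGravity (g : PVGrid) : PVGrid :=
  (List.range (g.getD 0 []).length).foldl pvGravityCol g

-- while True: …  (same fuel bound as A's loop, for the same reason)
def pvLoopB : ℕ → PVGrid → PVGrid
  | 0, g => g
  | fuel+1, g =>
    let cs := pvCornersB g
    if cs = [] then g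
    else pvLoopB fuel (pvGravity (pvClear cs g))

def solution_alt (m : Int) (n : Int) (board : List String) : Int :=
  let g : PVGrid := board.map (fun s => s.toList.map (fun c => String.mk [c]))
  let fin := pvLoopB (pvTotalCells g + 1) g
  ((fin.map (fun row => row.count "")).sum : ℕ)

-- ===== PRECONDITION & SPEC =====
-- Pre_ restricts to rectangular boards — the problem's natural m×n domain; on ragged boards A's chained
-- indexing (board[i+1][j+1] in find_del_block, board[i-up_idx][j] / board[0][j] in down_blocks) can raise IndexError.
def Pre_solution (m : Int) (n : Int) (board : List String) : Prop :=
  ∀ s ∈ board, s.toList.length = (board.headD "").toList.length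
instance (m : Int) (n : Int) (board : List String) : Decidable (Pre_solution m n board) := by unfold Pre_solution; infer_instance

def pvWitness_solution : Int × Int × List String := (2, 2, ["AB", "AB"])

def Spec_solution (m : Int) (n : Int) (board : List String) (out : Int) : Prop := out = solution_alt m n board
instance (m : Int) (n : Int) (board : List String) (out : Int) : Decidable (Spec_solution m n board out) := by unfold Spec_solution; infer_instance

-- ===== CLAIM (what is proved, stated in full; the proofs are below) =====
def Claim_equal_solution : Prop := ∀ (m : Int) (n : Int) (board : List String), Dom_solution m n board → Pre_solution m n board → Spec_solution m n board (solution m n board)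

-- ===== LEMMAS AND PROOFS =====

-- ---------- basic list/grid lemmas ----------

theorem pv_getD_set {α : Type} (d : α) (l : List α) (i i' : ℕ) (v : α) :
    (l.set i v).getD i' d = if i = i' ∧ i < l.length then v else l.getD i' d := by
  rw [List.getD_eq_getElem?_getD, List.getD_eq_getElem?_getD, List.getElem?_set]
  by_cases h1 : i = i'
  · subst h1
    by_cases h2 : i < l.length
    · simp [h2]
    · simp [h2]
  · simp [h1]

theorem pv_cell_setCell (g : PVGrid) (i j : ℕ) (v : String) (i' j' : ℕ) :
    pvCell (pvSetCell g i j v) i' j' =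
      if i = i' ∧ j = j' ∧ i < g.length ∧ j < (g.getD i []).length then v
      else pvCell g i' j' := by
  unfold pvCell pvSetCell
  rw [pv_getD_set]
  by_cases hi : i = i' ∧ i < g.length
  · rw [if_pos hi]
    obtain ⟨hii, hil⟩ := hi; subst hii
    rw [pv_getD_set]
    by_cases hj : j = j' ∧ j < (g.getD i []).length
    · rw [if_pos hj, if_pos ⟨rfl, hj.1, hil, hj.2⟩]
    · rw [if_neg hj, if_neg (by tauto)]
  · rw [if_neg hi, if_neg (by tauto)]

theorem pv_col_ext {c1 c2 : List String} (hl : c1.length = c2.length)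
    (h : ∀ p, c1.getD p "" = c2.getD p "") : c1 = c2 := by
  apply List.ext_getElem hl
  intro p h1 h2
  have := h p
  rwa [List.getD_eq_getElem _ _ h1, List.getD_eq_getElem _ _ h2] at this

-- column j of the grid
def pvColOf (g : PVGrid) (j : ℕ) : List String := g.map (fun row => row.getD j "")

theorem pv_colOf_getD (g : PVGrid) (j i : ℕ) : (pvColOf g j).getD i "" = pvCell g i j := by
  unfold pvColOf pvCell
  rw [List.getD_eq_getElem?_getD, List.getD_eq_getElem?_getD, List.getElem?_map]
  cases h : g[i]? <;> simp [h]

theorem pv_length_colOf (g : PVGrid) (j : ℕ) : (pvColOf g j).length = g.length := by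
  simp [pvColOf]

theorem pv_colOf_setCell_same (g : PVGrid) (i j : ℕ) (v : String)
    (hi : i < g.length) (hj : j < (g.getD i []).length) :
    pvColOf (pvSetCell g i j v) j = (pvColOf g j).set i v := by
  apply pv_col_ext
  · simp [pvColOf, pvSetCell]
  · intro p
    rw [pv_colOf_getD, pv_cell_setCell, pv_getD_set]
    have hlen : (pvColOf g j).length = g.length := pv_length_colOf g j
    by_cases hp : i = p
    · subst hp
      rw [if_pos ⟨rfl, rfl, hi, hj⟩, if_pos ⟨rfl, by rwa [hlen]⟩]
    · rw [if_neg (by tauto), if_neg (by tauto), pv_colOf_getD]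

theorem pv_colOf_setCell_other (g : PVGrid) (i j : ℕ) (v : String) (j' : ℕ) (hne : j ≠ j') :
    pvColOf (pvSetCell g i j v) j' = pvColOf g j' := by
  apply pv_col_ext
  · simp [pvColOf, pvSetCell]
  · intro p
    rw [pv_colOf_getD, pv_cell_setCell, if_neg (by tauto), pv_colOf_getD]

-- a rectangular r × c grid
def pvRect (r c : ℕ) (g : PVGrid) : Prop := g.length = r ∧ ∀ i, i < r → (g.getD i []).length = c

theorem pv_rowD_len {r c : ℕ} {g : PVGrid} (h : pvRect r c g) (i : ℕ) :
    (g.getD i []).length = if i < r then c else 0 := by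
  by_cases hi : i < r
  · rw [if_pos hi]; exact h.2 i hi
  · rw [if_neg hi]
    have hn : g[i]? = none := List.getElem?_eq_none (by rw [h.1]; omega)
    rw [List.getD_eq_getElem?_getD, hn]
    rfl

theorem pv_rect_setCell {r c : ℕ} {g : PVGrid} (h : pvRect r c g) (i j : ℕ) (v : String) :
    pvRect r c (pvSetCell g i j v) := by
  constructor
  · simp [pvSetCell, h.1]
  · intro i' hi'
    unfold pvSetCell
    rw [pv_getD_set]
    split_ifs with hc
    · obtain ⟨h1, h2⟩ := hc; subst h1
      rw [List.length_set]
      exact h.2 i hi'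
    · exact h.2 i' hi'

theorem pv_grid_ext {g1 g2 : PVGrid} (hl : g1.length = g2.length)
    (hrow : ∀ i, (g1.getD i []).length = (g2.getD i []).length)
    (hcell : ∀ i j, pvCell g1 i j = pvCell g2 i j) : g1 = g2 := by
  apply List.ext_getElem hl
  intro i h1 h2
  apply List.ext_getElem
  · have := hrow i
    rwa [List.getD_eq_getElem _ _ h1, List.getD_eq_getElem _ _ h2] at this
  · intro j hj1 hj2
    have := hcell i j
    unfold pvCell at this
    rw [List.getD_eq_getElem _ _ h1, List.getD_eq_getElem _ _ h2,
        List.getD_eq_getElem _ _ hj1, List.getD_eq_getElem _ _ hj2] at this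
    exact this

-- ---------- A's gravity, per column ----------

def pvCnt (c : List String) : ℕ → ℕ
  | 0 => 0
  | r+1 => if c.getD (r+1) "" = "" then pvCnt c r + 1 else 0

def pvColStep (i : ℕ) (c : List String) : List String :=
  if c.getD i "" = "" then
    (c.set i (c.getD (i - (1 + pvCnt c (i-1))) "")).set (i - (1 + pvCnt c (i-1))) (c.getD i "")
  else c

theorem pv_upCount_eq (g : PVGrid) (j : ℕ) : ∀ r, pvUpCount g j r = pvCnt (pvColOf g j) r
  | 0 => rfl
  | r+1 => by
    simp only [pvUpCount, pvCnt]
    rw [pv_colOf_getD, pv_upCount_eq g j r]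

theorem pv_rect_downStep {r c : ℕ} {g : PVGrid} (h : pvRect r c g) (i j : ℕ) :
    pvRect r c (pvDownStep i g j) := by
  unfold pvDownStep
  split_ifs with hc
  · exact pv_rect_setCell (pv_rect_setCell h _ _ _) _ _ _
  · exact h

theorem pv_colOf_downStep_other (i : ℕ) (g : PVGrid) (j j' : ℕ) (hne : j ≠ j') :
    pvColOf (pvDownStep i g j) j' = pvColOf g j' := by
  unfold pvDownStep
  split_ifs with hc
  · rw [pv_colOf_setCell_other _ _ _ _ _ hne, pv_colOf_setCell_other _ _ _ _ _ hne]
  · rfl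

theorem pv_colOf_downStep_same {r c : ℕ} {g : PVGrid} (h : pvRect r c g) {i j : ℕ}
    (h1 : 1 ≤ i) (h2 : i < r) (hj : j < c) :
    pvColOf (pvDownStep i g j) j = pvColStep i (pvColOf g j) := by
  unfold pvDownStep pvColStep
  simp only [pv_colOf_getD, ← pv_upCount_eq]
  split_ifs with hc
  · have hiu : i - (1 + pvUpCount g j (i-1)) < i := by omega
    have hg1 : (pvSetCell g i j (pvCell g (i - (1 + pvUpCount g j (i - 1))) j)).length = g.length := by
      simp [pvSetCell]
    have hrect2 : pvRect r c (pvSetCell g i j (pvCell g (i - (1 + pvUpCount g j (i - 1))) j)) :=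
      pv_rect_setCell h _ _ _
    rw [pv_colOf_setCell_same _ _ _ _ (by rw [hg1, h.1]; omega)
          (by rw [pv_rowD_len hrect2, if_pos (by omega : i - (1 + pvUpCount g j (i-1)) < r)]; exact hj),
        pv_colOf_setCell_same _ _ _ _ (by rw [h.1]; omega)
          (by rw [pv_rowD_len h, if_pos h2]; exact hj)]
  · rfl

theorem pv_downRow_fold {r c : ℕ} {i : ℕ} (h1 : 1 ≤ i) (h2 : i < r) :
    ∀ (js : List ℕ), js.Nodup → (∀ x ∈ js, x < c) → ∀ (g : PVGrid), pvRect r c g →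
      pvRect r c (js.foldl (pvDownStep i) g) ∧
      ∀ j, pvColOf (js.foldl (pvDownStep i) g) j =
        if j ∈ js then pvColStep i (pvColOf g j) else pvColOf g j := by
  intro js
  induction js with
  | nil => intro _ _ g hg; exact ⟨hg, fun j => by simp⟩
  | cons a rest ih =>
    intro hnd hmem g hg
    have ha : a < c := hmem a (by simp)
    have hstep := pv_rect_downStep hg i a
    obtain ⟨hr, hcols⟩ := ih (List.Nodup.of_cons hnd) (fun x hx => hmem x (by simp [hx]))
      (pvDownStep i g a) hstep
    refine ⟨hr, fun j => ?_⟩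
    simp only [List.foldl_cons]
    rw [hcols j]
    by_cases hj : j ∈ rest
    · rw [if_pos hj, if_pos (by simp [hj])]
      have hja : j ≠ a := by
        rintro rfl
        exact (List.nodup_cons.mp hnd).1 hj
      rw [pv_colOf_downStep_other i g a j (Ne.symm hja)]
    · rw [if_neg hj]
      by_cases hja : j = a
      · subst hja
        rw [if_pos (by simp), pv_colOf_downStep_same hg h1 h2 ha]
      · rw [if_neg (by simp [hja, hj]), pv_colOf_downStep_other i g a j (fun h => hja h.symm)]

theorem pv_downRow_spec {r c : ℕ} {g : PVGrid} (h : pvRect r c g) {i : ℕ} (h1 : 1 ≤ i) (h2 : i < r) :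
    pvRect r c (pvDownRow g i) ∧
    ∀ j, pvColOf (pvDownRow g i) j = if j < c then pvColStep i (pvColOf g j) else pvColOf g j := by
  unfold pvDownRow
  rw [pv_rowD_len h i, if_pos h2]
  obtain ⟨hr, hcol⟩ := pv_downRow_fold h1 h2 (List.range c) List.nodup_range
    (fun x hx => List.mem_range.mp hx) g h
  exact ⟨hr, fun j => by rw [hcol j]; simp [List.mem_range]⟩

theorem pv_downRows_fold {r c : ℕ} :
    ∀ (is : List ℕ), (∀ x ∈ is, 1 ≤ x ∧ x < r) → ∀ (g : PVGrid), pvRect r c g →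
      pvRect r c (is.foldl pvDownRow g) ∧
      ∀ j, pvColOf (is.foldl pvDownRow g) j =
        if j < c then is.foldl (fun col i => pvColStep i col) (pvColOf g j) else pvColOf g j := by
  intro is
  induction is with
  | nil => intro _ g hg; exact ⟨hg, fun j => by simp⟩
  | cons a rest ih =>
    intro hmem g hg
    obtain ⟨ha1, ha2⟩ := hmem a (by simp)
    obtain ⟨hrect1, hcol1⟩ := pv_downRow_spec hg ha1 ha2
    obtain ⟨hr, hcols⟩ := ih (fun x hx => hmem x (by simp [hx])) (pvDownRow g a) hrect1
    refine ⟨hr, fun j => ?_⟩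
    simp only [List.foldl_cons]
    rw [hcols j, hcol1 j]
    by_cases hj : j < c <;> simp [hj]

def pvColSim (r : ℕ) (col : List String) : List String :=
  ((List.range' 1 (r - 1)).reverse).foldl (fun c i => pvColStep i c) col

theorem pv_downBlocks_spec {r c : ℕ} {g : PVGrid} (h : pvRect r c g) :
    pvRect r c (pvDownBlocks g) ∧
    ∀ j, pvColOf (pvDownBlocks g) j = if j < c then pvColSim r (pvColOf g j) else pvColOf g j := by
  unfold pvDownBlocks pvColSim
  rw [h.1]
  exact pv_downRows_fold _ (fun x hx => by
    rw [List.mem_reverse, List.mem_range'] at hx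
    obtain ⟨k, hk, rfl⟩ := hx
    omega) g h

-- ---------- the pure one-column argument ----------

theorem pv_cnt_le (d : List String) : ∀ r, pvCnt d r ≤ r
  | 0 => le_refl 0
  | r+1 => by
    simp only [pvCnt]
    split_ifs
    · have := pv_cnt_le d r; omega
    · omega

theorem pv_cnt_spec (d : List String) (r : ℕ) :
    (∀ s, r - pvCnt d r < s → s ≤ r → d.getD s "" = "") ∧
    (r - pvCnt d r = 0 ∨ d.getD (r - pvCnt d r) "" ≠ "") := by
  induction r with
  | zero => exact ⟨fun s h1 h2 => absurd h2 (by omega), Or.inl rfl⟩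
  | succ r ih =>
    simp only [pvCnt]
    split_ifs with hd
    · have hle := pv_cnt_le d r
      constructor
      · intro s h1 h2
        rcases Nat.lt_or_ge s (r+1) with hs | hs
        · exact ih.1 s (by omega) (by omega)
        · have hseq : s = r + 1 := by omega
          subst hseq; exact hd
      · have heq : r + 1 - (pvCnt d r + 1) = r - pvCnt d r := by omega
        rw [heq]; exact ih.2
    · refine ⟨fun s h1 h2 => absurd h2 (by omega), Or.inr ?_⟩
      simpa using hd

def pvGood (i : ℕ) (d : List String) : Prop :=
  ∀ p, i < p → p < d.length → d.getD p "" = "" → ∀ q, q < p → d.getD q "" = ""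

theorem pv_filter_swap {d : List String} {t i : ℕ} (ht : t < i) (hi : i < d.length)
    (hmid : ∀ s, t < s → s < i → d.getD s "" = "") (hdi : d.getD i "" = "") :
    ((d.set i (d.getD t "")).set t (d.getD i "")).filter (fun v => v ≠ "") =
      d.filter (fun v => v ≠ "") := by
  have ht' : t < d.length := ht.trans hi
  set x := d.getD t "" with hx
  rw [hdi]
  have hTlen : (d.take t).length = t := by rw [List.length_take]; omega
  have hMlen : ((d.drop (t+1)).take (i - t - 1)).length = i - t - 1 := by
    rw [List.length_take, List.length_drop]; omega
  have hdecomp : d = d.take t ++ x :: ((d.drop (t+1)).take (i - t - 1) ++ "" :: d.drop (i+1)) := by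
    conv_lhs => rw [← List.take_append_drop t d]
    congr 1
    rw [List.drop_eq_getElem_cons ht']
    congr 1
    · rw [hx, List.getD_eq_getElem _ _ ht']
    · conv_lhs => rw [← List.take_append_drop (i - t - 1) (d.drop (t+1))]
      congr 1
      rw [List.drop_drop]
      have hids : t + 1 + (i - t - 1) = i := by omega
      rw [hids, List.drop_eq_getElem_cons hi]
      congr 1
      rw [← hdi, List.getD_eq_getElem _ _ hi]
  have hset : (d.set i x).set t "" =
      d.take t ++ "" :: ((d.drop (t+1)).take (i - t - 1) ++ x :: d.drop (i+1)) := by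
    conv_lhs => rw [hdecomp]
    set w := i - t - 1 with hw
    have hit : i - t = w + 1 := by omega
    rw [List.set_append (s := d.take t), if_neg (by rw [hTlen]; omega), hTlen, hit,
      List.set_cons_succ, List.set_append (s := (d.drop (t+1)).take w),
      if_neg (by rw [hMlen]; omega), hMlen]
    have h00 : w - w = 0 := by omega
    rw [h00, List.set_cons_zero]
    rw [List.set_append (s := d.take t), if_neg (by rw [hTlen]; omega), hTlen]
    have ht0 : t - t = 0 := by omega
    rw [ht0, List.set_cons_zero]
  have hMempty : ∀ y ∈ (d.drop (t+1)).take (i - t - 1), y = "" := by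
    intro y hy
    rw [List.mem_iff_getElem] at hy
    obtain ⟨s, hs, rfl⟩ := hy
    have hs' : s < i - t - 1 := by rw [hMlen] at hs; exact hs
    rw [List.getElem_take, List.getElem_drop]
    have hmm := hmid (t + 1 + s) (by omega) (by omega)
    rwa [List.getD_eq_getElem _ _ (by omega)] at hmm
  have hfM : ((d.drop (t+1)).take (i - t - 1)).filter (fun v => v ≠ "") = [] := by
    rw [List.filter_eq_nil_iff]
    intro a ha
    simp [hMempty a ha]
  rw [hset]
  conv_rhs => rw [hdecomp]
  simp only [List.filter_append, List.filter_cons, hfM]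
  by_cases hx0 : x = "" <;> simp [hx0]

theorem pv_colStep_spec {d : List String} {i : ℕ} (h1 : 1 ≤ i) (h2 : i < d.length) (hg : pvGood i d) :
    (pvColStep i d).length = d.length ∧
    (pvColStep i d).filter (fun v => v ≠ "") = d.filter (fun v => v ≠ "") ∧
    pvGood (i - 1) (pvColStep i d) := by
  unfold pvColStep
  split_ifs with hdi
  · set t := i - (1 + pvCnt d (i-1)) with htdef
    have hcnt := pv_cnt_spec d (i-1)
    have hcle := pv_cnt_le d (i-1)
    have ht_eq : t = (i-1) - pvCnt d (i-1) := by omega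
    have htlt : t < i := by omega
    have htlen : t < d.length := by omega
    have hmid : ∀ s, t < s → s < i → d.getD s "" = "" := by
      intro s hs1 hs2
      exact hcnt.1 s (by omega) (by omega)
    have htprop : t = 0 ∨ d.getD t "" ≠ "" := by rw [ht_eq]; exact hcnt.2
    have he : ∀ w, ((d.set i (d.getD t "")).set t (d.getD i "")).getD w "" =
        if t = w then d.getD i "" else if i = w then d.getD t "" else d.getD w "" := by
      intro w
      rw [pv_getD_set, pv_getD_set]
      simp only [List.length_set]
      by_cases hw1 : t = w
      · rw [if_pos ⟨hw1, htlen⟩, if_pos hw1]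
      · rw [if_neg (by tauto), if_neg hw1]
        by_cases hw2 : i = w
        · rw [if_pos ⟨hw2, h2⟩, if_pos hw2]
        · rw [if_neg (by tauto), if_neg hw2]
    refine ⟨by simp, pv_filter_swap htlt h2 hmid hdi, ?_⟩
    intro p hp hplen hpe q hq
    simp only [List.length_set] at hplen
    rw [he] at hpe
    rw [he]
    rcases Nat.lt_or_ge i p with hip | hip
    · rw [if_neg (by omega), if_neg (by omega)] at hpe
      have hall := hg p hip hplen hpe
      by_cases hq1 : t = q
      · rw [if_pos hq1]; exact hdi
      · rw [if_neg hq1]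
        by_cases hq2 : i = q
        · rw [if_pos hq2]; exact hall t (by omega)
        · rw [if_neg hq2]; exact hall q hq
    · have hpi : p = i := by omega
      subst hpi
      rw [if_neg (by omega), if_pos rfl] at hpe
      have ht0 : t = 0 := by
        rcases htprop with h | h
        · exact h
        · exact absurd hpe h
      by_cases hq1 : t = q
      · rw [if_pos hq1]; exact hdi
      · rw [if_neg hq1]
        by_cases hq2 : p = q
        · omega
        · rw [if_neg hq2]
          exact hmid q (by omega) (by omega)
  · refine ⟨rfl, rfl, ?_⟩
    intro p hp hplen hpe q hq
    rcases Nat.lt_or_ge i p with hip | hip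
    · exact hg p hip hplen hpe q hq
    · have : p = i := by omega
      subst this
      exact absurd hpe hdi

theorem pv_colSim_fold : ∀ (k : ℕ) (d : List String), k < d.length → pvGood k d →
    (((List.range' 1 k).reverse).foldl (fun c i => pvColStep i c) d).length = d.length ∧
    (((List.range' 1 k).reverse).foldl (fun c i => pvColStep i c) d).filter (fun v => v ≠ "")
      = d.filter (fun v => v ≠ "") ∧
    pvGood 0 (((List.range' 1 k).reverse).foldl (fun c i => pvColStep i c) d) := by
  intro k
  induction k with
  | zero => intro d _ hg; exact ⟨rfl, rfl, hg⟩
  | succ k ih =>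
    intro d hk hg
    have h1k : 1 + 1 * k = k + 1 := by omega
    have hrev : (List.range' 1 (k+1)).reverse = (k+1) :: (List.range' 1 k).reverse := by
      rw [List.range'_concat, h1k, List.reverse_append, List.reverse_singleton, List.singleton_append]
    rw [hrev]
    simp only [List.foldl_cons]
    obtain ⟨hl, hf, hg'⟩ := pv_colStep_spec (by omega) hk hg
    obtain ⟨hl2, hf2, hg2⟩ := ih (pvColStep (k+1) d) (by rw [hl]; omega) (by simpa using hg')
    exact ⟨hl2.trans hl, hf2.trans hf, hg2⟩

-- the compacted column: empties on top, non-empty cells below in order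
def pvCompact (c : List String) : List String :=
  List.replicate (c.length - (c.filter (fun v => v ≠ "")).length) "" ++ c.filter (fun v => v ≠ "")

theorem pv_good_zero_compact : ∀ (e : List String), pvGood 0 e → e = pvCompact e := by
  intro e
  induction e with
  | nil => intro _; rfl
  | cons x rest ih =>
    intro hg
    by_cases hx : x = ""
    · subst hx
      have hgr : pvGood 0 rest := by
        intro p hp hplen hpe q hq
        have := hg (p+1) (by omega) (by simpa using Nat.succ_lt_succ hplen)
          (by simpa using hpe) (q+1) (by omega)
        simpa using this
      have hfl : ("" :: rest).filter (fun v => v ≠ "") = rest.filter (fun v => v ≠ "") := by simp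
      unfold pvCompact
      rw [hfl]
      have hle := List.length_filter_le (fun v => decide (v ≠ "")) rest
      have hlen : ("" :: rest).length - (rest.filter (fun v => v ≠ "")).length
          = (rest.length - (rest.filter (fun v => v ≠ "")).length) + 1 := by
        simp only [List.length_cons]
        omega
      rw [hlen, List.replicate_succ, List.cons_append]
      conv_lhs => rw [ih hgr]
      rfl
    · have hall : ∀ a ∈ x :: rest, a ≠ "" := by
        intro a ha
        rw [List.mem_iff_getElem] at ha
        obtain ⟨p, hp, rfl⟩ := ha
        intro hpe
        rcases Nat.eq_zero_or_pos p with rfl | hppos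
        · exact hx (by simpa using hpe)
        · have := hg p (by omega) hp (by rw [List.getD_eq_getElem _ _ hp]; exact hpe) 0 (by omega)
          exact hx (by simpa using this)
      unfold pvCompact
      rw [List.filter_eq_self.mpr (by intro a ha; simpa using hall a ha)]
      simp

theorem pv_colSim_compact (col : List String) (r : ℕ) (h : col.length = r) :
    pvColSim r col = pvCompact col := by
  unfold pvColSim
  rcases Nat.lt_or_ge r 2 with hr | hr
  · have hr1 : r - 1 = 0 := by omega
    rw [hr1]
    simp only [List.range'_zero, List.reverse_nil, List.foldl_nil]
    rcases col with _ | ⟨x, rest⟩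
    · rfl
    · have hrest : rest = [] := by
        rw [← List.length_eq_zero_iff]
        simp only [List.length_cons] at h
        omega
      subst hrest
      by_cases hx : x = "" <;> simp [pvCompact, hx]
  · have h2 : r - 1 < col.length := by omega
    have hg : pvGood (r-1) col := by
      intro p hp hplen hpe q hq
      exact absurd hplen (by omega)
    obtain ⟨hl, hf, hg0⟩ := pv_colSim_fold (r-1) col h2 hg
    have hcc := pv_good_zero_compact _ hg0
    rw [hcc]
    unfold pvCompact
    rw [hf, hl]

-- ---------- B's gravity, per column ----------

theorem pv_col_map_range (g : PVGrid) (j : ℕ) :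
    (List.range g.length).map (fun i => pvCell g i j) = pvColOf g j := by
  apply List.ext_getElem
  · simp [pvColOf]
  · intro p h1 h2
    rw [List.getElem_map, List.getElem_range]
    rw [← List.getD_eq_getElem (pvColOf g j) "" h2, pv_colOf_getD]

theorem pv_writeCol_fold {r c : ℕ} {j : ℕ} (hj : j < c) (f : ℕ → String) :
    ∀ (k : ℕ) (g : PVGrid), pvRect r c g → k ≤ r →
      pvRect r c ((List.range k).foldl (fun g i => pvSetCell g i j (f i)) g) ∧
      pvColOf ((List.range k).foldl (fun g i => pvSetCell g i j (f i)) g) j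
        = (List.range k).map f ++ (pvColOf g j).drop k ∧
      ∀ j', j' ≠ j →
        pvColOf ((List.range k).foldl (fun g i => pvSetCell g i j (f i)) g) j' = pvColOf g j' := by
  intro k
  induction k with
  | zero => intro g hg _; exact ⟨hg, by simp, fun _ _ => rfl⟩
  | succ k ih =>
    intro g hg hk
    obtain ⟨hr, hcol, hoth⟩ := ih g hg (by omega)
    rw [List.range_succ]
    simp only [List.foldl_append, List.foldl_cons, List.foldl_nil]
    have hkr : k < r := by omega
    have hkG : k < ((List.range k).foldl (fun g i => pvSetCell g i j (f i)) g).length := by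
      rw [hr.1]; exact hkr
    have hjG : j < (((List.range k).foldl (fun g i => pvSetCell g i j (f i)) g).getD k []).length := by
      rw [pv_rowD_len hr, if_pos hkr]; exact hj
    refine ⟨pv_rect_setCell hr _ _ _, ?_, ?_⟩
    · rw [pv_colOf_setCell_same _ k j (f k) hkG hjG, hcol]
      have hclen : (pvColOf g j).length = r := by rw [pv_length_colOf, hg.1]
      rw [List.set_append, if_neg (by simp)]
      have hc0 : k - ((List.range k).map f).length = 0 := by simp
      rw [hc0, List.drop_eq_getElem_cons (by rw [hclen]; omega), List.set_cons_zero,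
        List.map_append]
      simp [List.append_assoc]
    · intro j' hj'
      rw [pv_colOf_setCell_other _ _ _ _ _ (fun h => hj' h.symm)]
      exact hoth j' hj'

theorem pv_gravityCol_spec {r c : ℕ} {g : PVGrid} (hg : pvRect r c g) {j : ℕ} (hj : j < c) :
    pvRect r c (pvGravityCol g j) ∧
    pvColOf (pvGravityCol g j) j = pvCompact (pvColOf g j) ∧
    ∀ j', j' ≠ j → pvColOf (pvGravityCol g j) j' = pvColOf g j' := by
  have hmap := pv_col_map_range g j
  have hclen : (pvColOf g j).length = r := by rw [pv_length_colOf, hg.1]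
  have hflen : ((pvColOf g j).filter (fun v => v ≠ "")).length ≤ r := by
    calc ((pvColOf g j).filter (fun v => v ≠ "")).length ≤ (pvColOf g j).length :=
          List.length_filter_le _ _
      _ = r := hclen
  obtain ⟨hr, hcol, hoth⟩ := pv_writeCol_fold hj
    (fun i => if i < g.length - ((pvColOf g j).filter (fun v => v ≠ "")).length then ""
      else ((pvColOf g j).filter (fun v => v ≠ "")).getD
        (i - (g.length - ((pvColOf g j).filter (fun v => v ≠ "")).length)) "")
    g.length g hg (by rw [hg.1])
  have hgc : pvGravityCol g j =
      (List.range g.length).foldl (fun g' i => pvSetCell g' i j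
        (if i < g.length - ((pvColOf g j).filter (fun v => v ≠ "")).length then ""
         else ((pvColOf g j).filter (fun v => v ≠ "")).getD
           (i - (g.length - ((pvColOf g j).filter (fun v => v ≠ "")).length)) "")) g := by
    unfold pvGravityCol
    rw [hmap]
  refine ⟨by rw [hgc]; exact hr, ?_, by intro j' hj'; rw [hgc]; exact hoth j' hj'⟩
  rw [hgc, hcol, List.drop_eq_nil_of_le (by rw [hclen, hg.1])]
  rw [List.append_nil]
  unfold pvCompact
  apply List.ext_getElem
  · simp only [List.length_map, List.length_range, List.length_append, List.length_replicate]
    rw [hclen, hg.1]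
    omega
  · intro p h1 h2
    rw [List.getElem_map, List.getElem_range]
    rw [hg.1] at *
    by_cases hp : p < r - ((pvColOf g j).filter (fun v => v ≠ "")).length
    · rw [if_pos hp, List.getElem_append_left (by rw [List.length_replicate, hclen]; omega),
        List.getElem_replicate]
    · rw [if_neg hp, List.getElem_append_right (by rw [List.length_replicate, hclen]; omega)]
      simp only [List.length_replicate, hclen]
      simp only [List.length_map, List.length_range] at h1
      rw [List.getD_eq_getElem _ "" (by omega)]

theorem pv_gravity_fold {r c : ℕ} :
    ∀ (js : List ℕ), js.Nodup → (∀ x ∈ js, x < c) → ∀ (g : PVGrid), pvRect r c g →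
      pvRect r c (js.foldl pvGravityCol g) ∧
      ∀ j, pvColOf (js.foldl pvGravityCol g) j =
        if j ∈ js then pvCompact (pvColOf g j) else pvColOf g j := by
  intro js
  induction js with
  | nil => intro _ _ g hg; exact ⟨hg, fun j => by simp⟩
  | cons a rest ih =>
    intro hnd hmem g hg
    have ha : a < c := hmem a (by simp)
    obtain ⟨hr1, hcolA, hothA⟩ := pv_gravityCol_spec hg ha
    obtain ⟨hr, hcols⟩ := ih (List.Nodup.of_cons hnd) (fun x hx => hmem x (by simp [hx]))
      (pvGravityCol g a) hr1
    refine ⟨hr, fun j => ?_⟩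
    simp only [List.foldl_cons]
    rw [hcols j]
    by_cases hj : j ∈ rest
    · rw [if_pos hj, if_pos (by simp [hj])]
      have hja : j ≠ a := by
        rintro rfl
        exact (List.nodup_cons.mp hnd).1 hj
      rw [hothA j hja]
    · rw [if_neg hj]
      by_cases hja : j = a
      · subst hja
        rw [if_pos (by simp), hcolA]
      · rw [if_neg (by simp [hja, hj]), hothA j hja]

theorem pv_gravity_spec {r c : ℕ} {g : PVGrid} (hg : pvRect r c g) :
    pvRect r c (pvGravity g) ∧
    ∀ j, pvColOf (pvGravity g) j = if j < c then pvCompact (pvColOf g j) else pvColOf g j := by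
  unfold pvGravity
  rcases Nat.eq_zero_or_pos r with hr | hr
  · have hnil : g = [] := by rw [← List.length_eq_zero_iff, hg.1, hr]
    subst hnil
    refine ⟨hg, fun j => ?_⟩
    split_ifs <;> rfl
  · have hrow0 : (g.getD 0 []).length = c := by rw [pv_rowD_len hg, if_pos hr]
    rw [hrow0]
    obtain ⟨hr2, hcols⟩ := pv_gravity_fold (List.range c) List.nodup_range
      (fun x hx => List.mem_range.mp hx) g hg
    exact ⟨hr2, fun j => by rw [hcols j]; simp [List.mem_range]⟩

theorem pv_downBlocks_eq_gravity {r c : ℕ} {g : PVGrid} (hg : pvRect r c g) :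
    pvDownBlocks g = pvGravity g := by
  obtain ⟨hr1, hcols1⟩ := pv_downBlocks_spec hg
  obtain ⟨hr2, hcols2⟩ := pv_gravity_spec hg
  apply pv_grid_ext
  · rw [hr1.1, hr2.1]
  · intro i
    rw [pv_rowD_len hr1, pv_rowD_len hr2]
  · intro i j
    rw [← pv_colOf_getD, ← pv_colOf_getD, hcols1 j, hcols2 j]
    by_cases hj : j < c
    · rw [if_pos hj, if_pos hj]
      have hlen : (pvColOf g j).length = r := by rw [pv_length_colOf, hg.1]
      rw [pv_colSim_compact _ r hlen]
    · rw [if_neg hj, if_neg hj]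

-- ---------- the deleted points coincide ----------

def pvMatch (g : PVGrid) (i j : ℕ) : Prop :=
  pvCell g i j = pvCell g i (j+1) ∧ pvCell g i (j+1) = pvCell g (i+1) j ∧
  pvCell g (i+1) j = pvCell g (i+1) (j+1) ∧ pvCell g (i+1) (j+1) ≠ ""

def pvPts (p : ℕ × ℕ) : List (ℕ × ℕ) :=
  [(p.1, p.2), (p.1, p.2+1), (p.1+1, p.2), (p.1+1, p.2+1)]

theorem pv_mem_findInner (g : PVGrid) (i j : ℕ) (s : PySem.Set (ℕ × ℕ)) (p : ℕ × ℕ) :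
    p ∈ pvFindInner g i s j ↔ p ∈ s ∨ (pvMatch g i j ∧ p ∈ pvPts (i, j)) := by
  unfold pvFindInner pvMatch pvPts
  split_ifs with h
  · simp only [PySem.Set.mem_add, List.mem_cons, List.not_mem_nil, or_false]
    tauto
  · simp [h]

theorem pv_mem_findRow (g : PVGrid) (i : ℕ) (p : ℕ × ℕ) :
    ∀ (js : List ℕ) (s : PySem.Set (ℕ × ℕ)),
      p ∈ js.foldl (pvFindInner g i) s ↔ p ∈ s ∨ ∃ j ∈ js, pvMatch g i j ∧ p ∈ pvPts (i, j)
  | [], s => by simp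
  | j0 :: rest, s => by
    simp only [List.foldl_cons]
    rw [pv_mem_findRow g i p rest (pvFindInner g i s j0), pv_mem_findInner]
    constructor
    · rintro ((h | h) | ⟨j, hj, hm⟩)
      · exact Or.inl h
      · exact Or.inr ⟨j0, by simp, h⟩
      · exact Or.inr ⟨j, by simp [hj], hm⟩
    · rintro (h | ⟨j, hj, hm⟩)
      · exact Or.inl (Or.inl h)
      · rcases List.mem_cons.mp hj with rfl | hj'
        · exact Or.inl (Or.inr hm)
        · exact Or.inr ⟨j, hj', hm⟩

theorem pv_mem_findDel (g : PVGrid) (p : ℕ × ℕ) :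
    p ∈ pvFindDelBlock g ↔
      ∃ i, i < g.length - 1 ∧ ∃ j, j < (g.getD i []).length - 1 ∧ pvMatch g i j ∧ p ∈ pvPts (i, j) := by
  unfold pvFindDelBlock
  have hout : ∀ (is : List ℕ) (s : PySem.Set (ℕ × ℕ)),
      p ∈ is.foldl (pvFindRow g) s ↔
        p ∈ s ∨ ∃ i ∈ is, ∃ j, j < (g.getD i []).length - 1 ∧ pvMatch g i j ∧ p ∈ pvPts (i, j) := by
    intro is
    induction is with
    | nil => intro s; simp
    | cons a rest ih =>
      intro s
      simp only [List.foldl_cons]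
      rw [ih]
      unfold pvFindRow
      rw [pv_mem_findRow]
      constructor
      · rintro ((h | ⟨j, hj, hm⟩) | ⟨i, hi, hrest⟩)
        · exact Or.inl h
        · exact Or.inr ⟨a, by simp, j, List.mem_range.mp hj, hm⟩
        · exact Or.inr ⟨i, by simp [hi], hrest⟩
      · rintro (h | ⟨i, hi, j, hj, hm⟩)
        · exact Or.inl (Or.inl h)
        · rcases List.mem_cons.mp hi with rfl | hi'
          · exact Or.inl (Or.inr ⟨j, List.mem_range.mpr hj, hm⟩)
          · exact Or.inr ⟨i, hi', j, hj, hm⟩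
  rw [hout]
  have hemp : p ∈ (PySem.Set.empty : PySem.Set (ℕ × ℕ)) ↔ False := by
    simp [PySem.Set.empty]
  rw [hemp]
  simp [List.mem_range]

theorem pv_matchB_iff (g : PVGrid) (i j : ℕ) :
    (pvCell g i j ≠ "" ∧ pvCell g i j = pvCell g i (j+1) ∧
     pvCell g i (j+1) = pvCell g (i+1) j ∧ pvCell g (i+1) j = pvCell g (i+1) (j+1)) ↔
    pvMatch g i j := by
  unfold pvMatch
  constructor
  · rintro ⟨h0, h1, h2, h3⟩
    refine ⟨h1, h2, h3, ?_⟩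
    rw [← h3, ← h2, ← h1]
    exact h0
  · rintro ⟨h1, h2, h3, h4⟩
    refine ⟨?_, h1, h2, h3⟩
    rw [h1, h2, h3]
    exact h4

theorem pv_mem_cornerRow (g : PVGrid) (i : ℕ) (p : ℕ × ℕ) :
    ∀ (js : List ℕ) (acc : List (ℕ × ℕ)),
      p ∈ js.foldl (pvCornerInner g i) acc ↔ p ∈ acc ∨ ∃ j ∈ js, pvMatch g i j ∧ p = (i, j)
  | [], acc => by simp
  | j0 :: rest, acc => by
    simp only [List.foldl_cons]
    rw [pv_mem_cornerRow g i p rest (pvCornerInner g i acc j0)]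
    have hstep : p ∈ pvCornerInner g i acc j0 ↔ p ∈ acc ∨ (pvMatch g i j0 ∧ p = (i, j0)) := by
      unfold pvCornerInner
      split_ifs with h
      · rw [List.mem_append, List.mem_singleton]
        rw [pv_matchB_iff] at h
        tauto
      · rw [pv_matchB_iff] at h
        tauto
    rw [hstep]
    constructor
    · rintro ((h | h) | ⟨j, hj, hm⟩)
      · exact Or.inl h
      · exact Or.inr ⟨j0, by simp, h⟩
      · exact Or.inr ⟨j, by simp [hj], hm⟩
    · rintro (h | ⟨j, hj, hm⟩)
      · exact Or.inl (Or.inl h)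
      · rcases List.mem_cons.mp hj with rfl | hj'
        · exact Or.inl (Or.inr hm)
        · exact Or.inr ⟨j, hj', hm⟩

theorem pv_mem_corners (g : PVGrid) (p : ℕ × ℕ) :
    p ∈ pvCornersB g ↔
      ∃ i, i < g.length - 1 ∧ ∃ j, j < (g.getD i []).length - 1 ∧ pvMatch g i j ∧ p = (i, j) := by
  unfold pvCornersB
  have hout : ∀ (is : List ℕ) (acc : List (ℕ × ℕ)),
      p ∈ is.foldl (pvCornerRow g) acc ↔
        p ∈ acc ∨ ∃ i ∈ is, ∃ j, j < (g.getD i []).length - 1 ∧ pvMatch g i j ∧ p = (i, j) := by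
    intro is
    induction is with
    | nil => intro acc; simp
    | cons a rest ih =>
      intro acc
      simp only [List.foldl_cons]
      rw [ih]
      unfold pvCornerRow
      rw [pv_mem_cornerRow]
      constructor
      · rintro ((h | ⟨j, hj, hm⟩) | ⟨i, hi, hrest⟩)
        · exact Or.inl h
        · exact Or.inr ⟨a, by simp, j, List.mem_range.mp hj, hm⟩
        · exact Or.inr ⟨i, by simp [hi], hrest⟩
      · rintro (h | ⟨i, hi, j, hj, hm⟩)
        · exact Or.inl (Or.inl h)
        · rcases List.mem_cons.mp hi with rfl | hi'
          · exact Or.inl (Or.inr ⟨j, List.mem_range.mpr hj, hm⟩)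
          · exact Or.inr ⟨i, hi', j, hj, hm⟩
  rw [hout]
  simp [List.mem_range]

theorem pv_empty_iff (g : PVGrid) : pvFindDelBlock g = [] ↔ pvCornersB g = [] := by
  rw [List.eq_nil_iff_forall_not_mem, List.eq_nil_iff_forall_not_mem]
  constructor
  · intro h p hp
    rw [pv_mem_corners] at hp
    obtain ⟨i, hi, j, hj, hm, rfl⟩ := hp
    exact h (i, j) ((pv_mem_findDel g (i, j)).mpr ⟨i, hi, j, hj, hm, by simp [pvPts]⟩)
  · intro h p hp
    rw [pv_mem_findDel] at hp
    obtain ⟨i, hi, j, hj, hm, hpp⟩ := hp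
    exact h (i, j) ((pv_mem_corners g (i, j)).mpr ⟨i, hi, j, hj, hm, rfl⟩)

-- ---------- clearing coincides ----------

theorem pv_applyDel_cons (p : ℕ × ℕ) (rest : List (ℕ × ℕ)) (g : PVGrid) :
    pvApplyDel (p :: rest) g = pvApplyDel rest (pvSetCell g p.1 p.2 "") := rfl

theorem pv_applyDel_len : ∀ (pts : List (ℕ × ℕ)) (g : PVGrid),
    (pvApplyDel pts g).length = g.length ∧
    ∀ i, ((pvApplyDel pts g).getD i []).length = (g.getD i []).length
  | [], g => ⟨rfl, fun _ => rfl⟩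
  | p :: rest, g => by
    rw [pv_applyDel_cons]
    obtain ⟨h1, h2⟩ := pv_applyDel_len rest (pvSetCell g p.1 p.2 "")
    refine ⟨h1.trans (by simp [pvSetCell]), fun i => (h2 i).trans ?_⟩
    unfold pvSetCell
    rw [pv_getD_set]
    split_ifs with hc
    · obtain ⟨ha, hb⟩ := hc
      subst ha
      simp
    · rfl

theorem pv_cell_applyDel : ∀ (pts : List (ℕ × ℕ)) (g : PVGrid) (y x : ℕ),
    pvCell (pvApplyDel pts g) y x =
      if (y, x) ∈ pts ∧ y < g.length ∧ x < (g.getD y []).length then "" else pvCell g y x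
  | [], g, y, x => by simp [pvApplyDel]
  | p :: rest, g, y, x => by
    obtain ⟨p1, p2⟩ := p
    rw [pv_applyDel_cons, pv_cell_applyDel rest _ y x]
    have hL : (pvSetCell g p1 p2 "").length = g.length := by simp [pvSetCell]
    have hR : ((pvSetCell g p1 p2 "").getD y []).length = (g.getD y []).length := by
      unfold pvSetCell
      rw [pv_getD_set]
      split_ifs with hc
      · obtain ⟨ha, hb⟩ := hc; subst ha; simp
      · rfl
    rw [hL, hR, pv_cell_setCell]
    by_cases hr : y < g.length ∧ x < (g.getD y []).length
    · obtain ⟨hy, hx⟩ := hr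
      by_cases hm : (y, x) ∈ rest
      · rw [if_pos ⟨hm, hy, hx⟩, if_pos ⟨List.mem_cons_of_mem _ hm, hy, hx⟩]
      · rw [if_neg (by tauto)]
        by_cases hp : p1 = y ∧ p2 = x
        · obtain ⟨hp1, hp2⟩ := hp
          subst hp1; subst hp2
          rw [if_pos ⟨rfl, rfl, hy, hx⟩, if_pos ⟨by simp, hy, hx⟩]
        · rw [if_neg (by tauto), if_neg ?_]
          rintro ⟨hmem, -, -⟩
          rcases List.mem_cons.mp hmem with heq | hmem'
          · simp only [Prod.mk.injEq] at heq
            exact hp ⟨heq.1.symm, heq.2.symm⟩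
          · exact hm hmem'
    · have hcond : ¬((p1, p2).1 = y ∧ (p1, p2).2 = x ∧ (p1, p2).1 < g.length ∧
          (p1, p2).2 < (g.getD (p1, p2).1 []).length) := by
        rintro ⟨h1, h2, h3, h4⟩
        apply hr
        rw [← h1, ← h2]
        exact ⟨h3, h4⟩
      rw [if_neg (by tauto), if_neg hcond, if_neg (by tauto)]

theorem pv_applyDel_congr {pts1 pts2 : List (ℕ × ℕ)} (h : ∀ p, p ∈ pts1 ↔ p ∈ pts2) (g : PVGrid) :
    pvApplyDel pts1 g = pvApplyDel pts2 g := by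
  apply pv_grid_ext
  · rw [(pv_applyDel_len pts1 g).1, (pv_applyDel_len pts2 g).1]
  · intro i
    rw [(pv_applyDel_len pts1 g).2 i, (pv_applyDel_len pts2 g).2 i]
  · intro y x
    rw [pv_cell_applyDel, pv_cell_applyDel]
    simp only [h (y, x)]

theorem pv_clear_eq_applyDel : ∀ (cs : List (ℕ × ℕ)) (g : PVGrid),
    pvClear cs g = pvApplyDel (cs.flatMap pvPts) g
  | [], g => rfl
  | p :: rest, g => by
    have hstep : pvClear (p :: rest) g = pvClear rest
        (pvSetCell (pvSetCell (pvSetCell (pvSetCell g p.1 p.2 "") p.1 (p.2+1) "") (p.1+1) p.2 "") (p.1+1) (p.2+1) "") := rfl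
    have happ : ∀ (l1 l2 : List (ℕ × ℕ)) (g0 : PVGrid),
        pvApplyDel (l1 ++ l2) g0 = pvApplyDel l2 (pvApplyDel l1 g0) :=
      fun l1 l2 g0 => List.foldl_append
    rw [hstep, pv_clear_eq_applyDel rest _,
      show (p :: rest).flatMap pvPts = pvPts p ++ rest.flatMap pvPts from rfl, happ]
    rfl

theorem pv_round_eq (g : PVGrid) :
    pvApplyDel (pvFindDelBlock g) g = pvClear (pvCornersB g) g := by
  rw [pv_clear_eq_applyDel]
  apply pv_applyDel_congr
  intro p
  rw [pv_mem_findDel, List.mem_flatMap]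
  constructor
  · rintro ⟨i, hi, j, hj, hm, hp⟩
    exact ⟨(i, j), (pv_mem_corners g (i, j)).mpr ⟨i, hi, j, hj, hm, rfl⟩, hp⟩
  · rintro ⟨q, hq, hp⟩
    obtain ⟨i, hi, j, hj, hm, rfl⟩ := (pv_mem_corners g q).mp hq
    exact ⟨i, hi, j, hj, hm, hp⟩

theorem pv_rect_applyDel {r c : ℕ} {g : PVGrid} (h : pvRect r c g) (pts : List (ℕ × ℕ)) :
    pvRect r c (pvApplyDel pts g) :=
  ⟨(pv_applyDel_len pts g).1.trans h.1,
   fun i hi => ((pv_applyDel_len pts g).2 i).trans (h.2 i hi)⟩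

-- ---------- the loops agree ----------

theorem pv_loops_eq : ∀ (fuel : ℕ) {r c : ℕ} (g : PVGrid), pvRect r c g →
    pvLoopA fuel g = pvLoopB fuel g
  | 0, _, _, _, _ => rfl
  | fuel+1, r, c, g, hg => by
    simp only [pvLoopA, pvLoopB]
    by_cases h : pvFindDelBlock g = []
    · rw [if_pos h, if_pos ((pv_empty_iff g).mp h)]
    · rw [if_neg h, if_neg (fun hc => h ((pv_empty_iff g).mpr hc))]
      have hrd : pvRect r c (pvApplyDel (pvFindDelBlock g) g) := pv_rect_applyDel hg _
      rw [← pv_round_eq g, pv_downBlocks_eq_gravity hrd]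
      exact pv_loops_eq fuel (pvGravity (pvApplyDel (pvFindDelBlock g) g)) (pv_gravity_spec hrd).1

theorem pv_rect_initial (board : List String)
    (hpre : ∀ s ∈ board, s.toList.length = (board.headD "").toList.length) :
    pvRect board.length ((board.headD "").toList.length)
      (board.map (fun s => s.toList.map (fun c => String.mk [c]))) := by
  constructor
  · simp
  · intro i hi
    have hlen : i < (board.map (fun s => s.toList.map (fun c => String.mk [c]))).length := by
      simpa using hi
    rw [List.getD_eq_getElem _ _ hlen]
    rw [List.getElem_map]
    rw [List.length_map]
    exact hpre _ (List.getElem_mem hi)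

-- ===== VERDICT (by name: the statement is the Claim_ definition above) =====
theorem solution_spec : Claim_equal_solution := by
  unfold Claim_equal_solution
  intro m n board _ hpre
  unfold Spec_solution
  simp only [solution, solution_alt]
  rw [pv_loops_eq _ _ (pv_rect_initial board hpre)]
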